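-- pv_equiv track=rewrite | github.com/igoyalsamarth/localcode | services/github/pr_conversation_context.py | _format_conversation_section
-- ===== SOURCE A (Python) =====
-- _CONV_HEADER = "### Conversation comments (timeline)\n"
--
-- _CONV_TRUNC_LEAD = (
--     "[Older conversation comments were omitted due to size limits; "
--     "below is the most recent portion of the thread.]\n\n"
-- )
--
-- def _format_conversation_section(conv_blocks: list[str], max_chars: int) -> str:
--     """
--     Build the timeline section. When over ``max_chars``, keep **newest** comments
--     (GitHub returns issue comments oldest-first; we drop from the start).
--     """
--     if not conv_blocks:
--         return ""
--     header = _CONV_HEADER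
--     body = "\n".join(conv_blocks)
--     full = header + body
--     if len(full) <= max_chars:
--         return full
--
--     notice = _CONV_TRUNC_LEAD
--     budget = max_chars - len(header) - len(notice)
--     if budget < 40:
--         return (header + notice.rstrip()).strip() + "\n"
--
--     kept: list[str] = []
--     used = 0
--     for block in reversed(conv_blocks):
--         sep_len = 1 if kept else 0
--         if used + sep_len + len(block) <= budget:
--             kept.insert(0, block)
--             used += sep_len + len(block)
--         elif not kept:
--             # Newest comment alone exceeds budget — keep its trailing characters only.
--             kept = [block[-budget:].lstrip()]
--             break
--         else:
--             break
--
--     return header + notice + "\n".join(kept)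
-- ===== SOURCE B (Python) =====
-- _CONV_HEADER = "### Conversation comments (timeline)\n"
--
-- _CONV_TRUNC_LEAD = (
--     "[Older conversation comments were omitted due to size limits; "
--     "below is the most recent portion of the thread.]\n\n"
-- )
--
-- def _format_conversation_section(conv_blocks: list[str], max_chars: int) -> str:
--     # Forward scan: drop oldest blocks from the already-joined body until the
--     # remaining suffix fits the budget, then slice the body directly.
--     if not conv_blocks:
--         return ""
--     header = _CONV_HEADER
--     body = "\n".join(conv_blocks)
--     full = header + body
--     if len(full) <= max_chars:
--         return full
--     notice = _CONV_TRUNC_LEAD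
--     budget = max_chars - len(header) - len(notice)
--     if budget < 40:
--         return (header + notice.rstrip()).strip() + "\n"
--     n = len(conv_blocks)
--     removed = 0
--     i = 0
--     while i < n and len(body) - removed > budget:
--         removed += len(conv_blocks[i]) + 1
--         i += 1
--     if i == n:
--         # even the newest block alone exceeds the budget
--         return header + notice + conv_blocks[-1][-budget:].lstrip()
--     return header + notice + body[removed:]
-- ===== Notes on version B (the rewrite author's own statement) =====
-- stated objective: alternative
-- what changed: A walks the blocks newest-to-oldest, accumulating kept blocks with repeated list.insert(0, ...) and joining them at the end; B scans forward over the already-joined body, dropping oldest blocks by accumulating a removed-prefix length, and returns a single slice body[removed:] (no kept list, no second join).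
import Mathlib
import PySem

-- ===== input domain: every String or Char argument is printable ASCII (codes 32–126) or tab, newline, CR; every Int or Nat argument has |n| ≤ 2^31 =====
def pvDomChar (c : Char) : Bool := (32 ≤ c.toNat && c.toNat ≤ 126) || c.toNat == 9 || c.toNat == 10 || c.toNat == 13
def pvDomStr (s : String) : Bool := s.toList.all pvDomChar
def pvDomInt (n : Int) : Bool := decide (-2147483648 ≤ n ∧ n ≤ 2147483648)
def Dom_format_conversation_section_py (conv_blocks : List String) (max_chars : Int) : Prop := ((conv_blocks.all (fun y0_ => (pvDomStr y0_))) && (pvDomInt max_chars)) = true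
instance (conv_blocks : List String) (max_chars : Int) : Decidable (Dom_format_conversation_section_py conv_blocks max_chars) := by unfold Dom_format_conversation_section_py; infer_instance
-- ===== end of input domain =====

-- B replaces A's newest-to-oldest greedy accumulation (repeated kept.insert(0, …) then a join)
-- by a forward scan that drops oldest blocks from the already-joined body and slices it once.

-- module string constants (shared by both Python versions)
def pvConvHeader : String := "### Conversation comments (timeline)\n"
def pvConvTruncLead : String := "[Older conversation comments were omitted due to size limits; below is the most recent portion of the thread.]\n\n"

-- ===== PORT A =====
-- A's 'for block in reversed(conv_blocks)' loop with its break, state (kept, used)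
def pvKeepLoop (blocks : List String) (budget : Int) (kept : List String) (used : Int) : List String :=
  match blocks with
  | [] => kept
  | block :: rest =>
    let sepLen : Int := if kept.isEmpty then 0 else 1
    if used + sepLen + PySem.Str.len block ≤ budget then
      pvKeepLoop rest budget (PySem.List.insert kept 0 block) (used + sepLen + PySem.Str.len block)
    else if kept.isEmpty then
      [PySem.Str.lstrip (PySem.Str.slice block (some (-budget)) none)]
    else kept

def format_conversation_section_py (conv_blocks : List String) (max_chars : Int) : String :=
  if conv_blocks.isEmpty then "" else
  let header := pvConvHeader
  let body := PySem.Str.join "\n" conv_blocks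
  let full := header ++ body
  if PySem.Str.len full ≤ max_chars then full else
  let notice := pvConvTruncLead
  let budget := max_chars - PySem.Str.len header - PySem.Str.len notice
  if budget < 40 then
    PySem.Str.strip (header ++ PySem.Str.rstrip notice) ++ "\n"
  else
    header ++ notice ++ PySem.Str.join "\n" (pvKeepLoop conv_blocks.reverse budget [] 0)

-- ===== PORT B =====
-- B's 'while i < n and len(body) - removed > budget' loop; none = the loop ran off the end (i == n)
def pvDropLoop (blocks : List String) (bodyLen budget removed : Int) : Option Int :=
  match blocks with
  | [] => none
  | block :: rest =>
    if bodyLen - removed > budget then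
      pvDropLoop rest bodyLen budget (removed + PySem.Str.len block + 1)
    else some removed

def format_conversation_section_py_alt (conv_blocks : List String) (max_chars : Int) : String :=
  if conv_blocks.isEmpty then "" else
  let header := pvConvHeader
  let body := PySem.Str.join "\n" conv_blocks
  let full := header ++ body
  if PySem.Str.len full ≤ max_chars then full else
  let notice := pvConvTruncLead
  let budget := max_chars - PySem.Str.len header - PySem.Str.len notice
  if budget < 40 then
    PySem.Str.strip (header ++ PySem.Str.rstrip notice) ++ "\n"
  else
    match pvDropLoop conv_blocks (PySem.Str.len body) budget 0 with
    | none =>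
      -- conv_blocks[-1]; the list is nonempty here, so the getD default is never used
      header ++ notice ++ PySem.Str.lstrip (PySem.Str.slice ((PySem.List.pyGet? conv_blocks (-1)).getD "") (some (-budget)) none)
    | some removed => header ++ notice ++ PySem.Str.slice body (some removed) none

-- ===== PRECONDITION & SPEC =====
def Spec_format_conversation_section_py (conv_blocks : List String) (max_chars : Int) (out : String) : Prop := out = format_conversation_section_py_alt conv_blocks max_chars
instance (conv_blocks : List String) (max_chars : Int) (out : String) : Decidable (Spec_format_conversation_section_py conv_blocks max_chars out) := by unfold Spec_format_conversation_section_py; infer_instance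

-- ===== CLAIM (what is proved, stated in full; the proofs are below) =====
def Claim_equal_format_conversation_section_py : Prop := ∀ (conv_blocks : List String) (max_chars : Int), Dom_format_conversation_section_py conv_blocks max_chars → Spec_format_conversation_section_py conv_blocks max_chars (format_conversation_section_py conv_blocks max_chars)

-- ===== LEMMAS AND PROOFS =====

-- greedy count: how many blocks A's loop takes from the (reversed) list, given running cost acc
def pvGCount (budget : Int) : List String → Int → Nat
  | [], _ => 0
  | b :: rest, acc =>
    if acc + PySem.Str.len b ≤ budget then pvGCount budget rest (acc + PySem.Str.len b + 1) + 1 else 0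

-- cost of a list of blocks when joined: each block's length plus one separator
def pvSumCost (r : List String) : Int := (r.map (fun s => PySem.Str.len s + 1)).sum

lemma pvLenNonneg (s : String) : 0 ≤ PySem.Str.len s := by
  simp [PySem.Str.len_eq]

lemma pvSumCostNonneg (r : List String) : 0 ≤ pvSumCost r := by
  induction r with
  | nil => simp [pvSumCost]
  | cons b t ih =>
    have := pvLenNonneg b
    simp only [pvSumCost, List.map_cons, List.sum_cons] at *
    omega

lemma pvJoinToList_cons (b : String) (rest : List String) (hr : rest ≠ []) :
    (PySem.Str.join "\n" (b :: rest)).toList = b.toList ++ '\n' :: (PySem.Str.join "\n" rest).toList := by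
  obtain ⟨q, rest', rfl⟩ := List.exists_cons_of_ne_nil hr
  simp [PySem.Str.toList_join, PySem.Chars.join_cons_cons]

lemma pvLenJ_cons (b : String) (rest : List String) (hr : rest ≠ []) :
    PySem.Str.len (PySem.Str.join "\n" (b :: rest)) = PySem.Str.len b + 1 + PySem.Str.len (PySem.Str.join "\n" rest) := by
  simp [PySem.Str.len_eq, pvJoinToList_cons b rest hr]
  omega

lemma pvJoinSingleton (s : String) : PySem.Str.join "\n" [s] = s := by
  apply String.toList_inj.mp
  simp [PySem.Str.toList_join, PySem.Chars.join_singleton]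

lemma pvSumCost_eq (r : List String) (hr : r ≠ []) :
    pvSumCost r = PySem.Str.len (PySem.Str.join "\n" r) + 1 := by
  induction r with
  | nil => exact absurd rfl hr
  | cons b t ih =>
    by_cases ht : t = []
    · subst ht
      simp [pvSumCost, pvJoinSingleton]
    · rw [pvLenJ_cons b t ht]
      have := ih ht
      simp only [pvSumCost, List.map_cons, List.sum_cons] at *
      omega

lemma pvSumCost_reverse (r : List String) : pvSumCost r.reverse = pvSumCost r := by
  simp [pvSumCost]

lemma pvGCount_le_length (budget : Int) : ∀ (r : List String) (acc : Int), pvGCount budget r acc ≤ r.length := by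
  intro r
  induction r with
  | nil => intro acc; simp [pvGCount]
  | cons b t ih =>
    intro acc
    simp only [pvGCount, List.length_cons]
    split
    · exact Nat.succ_le_succ (ih _)
    · omega

lemma pvKeep_gen (budget : Int) : ∀ (r kept : List String) (used : Int), kept ≠ [] →
    pvKeepLoop r budget kept used = (r.take (pvGCount budget r (used + 1))).reverse ++ kept := by
  intro r
  induction r with
  | nil => intro kept used hk; simp [pvKeepLoop, pvGCount]
  | cons b t ih =>
    intro kept used hk
    have hke : kept.isEmpty = false := by simpa [List.isEmpty_iff] using hk
    simp only [pvKeepLoop, pvGCount, hke, Bool.false_eq_true, if_false]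
    by_cases h : used + 1 + PySem.Str.len b ≤ budget
    · rw [if_pos h, if_pos (by omega), PySem.List.insert_zero]
      rw [ih (b :: kept) (used + 1 + PySem.Str.len b) (by simp)]
      simp only [List.take_succ_cons, List.reverse_cons, List.append_assoc, List.cons_append,
        List.nil_append]
    · rw [if_neg h, if_neg (by omega)]
      simp

lemma pvKeep_char (budget : Int) (b : String) (t : List String) :
    pvKeepLoop (b :: t) budget [] 0 =
      if pvGCount budget (b :: t) 0 = 0 then
        [PySem.Str.lstrip (PySem.Str.slice b (some (-budget)) none)]
      else ((b :: t).take (pvGCount budget (b :: t) 0)).reverse := by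
  simp only [pvKeepLoop, pvGCount, List.isEmpty_nil, if_true]
  by_cases h : 0 + PySem.Str.len b ≤ budget
  · rw [if_pos (by omega), if_pos h, PySem.List.insert_zero]
    rw [pvKeep_gen budget t [b] (0 + 0 + PySem.Str.len b) (by simp)]
    rw [if_neg (by omega)]
    have hacc : 0 + 0 + PySem.Str.len b + 1 = 0 + PySem.Str.len b + 1 := by omega
    rw [hacc]
    simp [List.take_succ_cons]
  · rw [if_neg (by omega), if_neg h, if_pos rfl]

lemma pvGApp (budget : Int) (b : String) : ∀ (r : List String) (acc : Int),
    pvGCount budget (r ++ [b]) acc =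
      if acc + pvSumCost r + PySem.Str.len b ≤ budget then r.length + 1 else pvGCount budget r acc := by
  intro r
  induction r with
  | nil => intro acc; simp [pvGCount, pvSumCost]
  | cons c r' ih =>
    intro acc
    have hs := pvSumCostNonneg r'
    have hlb := pvLenNonneg b
    have hlc := pvLenNonneg c
    simp only [List.cons_append, pvGCount, pvSumCost, List.map_cons, List.sum_cons] at *
    by_cases h : acc + PySem.Str.len c ≤ budget
    · rw [if_pos h, if_pos h, ih]
      by_cases hC : acc + (PySem.Str.len c + 1 + (List.map (fun s => PySem.Str.len s + 1) r').sum) + PySem.Str.len b ≤ budget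
      · rw [if_pos (by omega), if_pos (by omega)]
        simp
      · rw [if_neg (by omega), if_neg (by omega)]
    · rw [if_neg h, if_neg (by omega), if_neg h]

lemma pvGFull (budget : Int) : ∀ (r : List String) (acc : Int), acc + pvSumCost r ≤ budget + 1 →
    pvGCount budget r acc = r.length := by
  intro r
  induction r with
  | nil => intro acc _; simp [pvGCount]
  | cons c r' ih =>
    intro acc h
    have hs := pvSumCostNonneg r'
    simp only [pvSumCost, List.map_cons, List.sum_cons] at h
    simp only [pvGCount, List.length_cons]
    rw [if_pos (by simp only [pvSumCost] at *; omega)]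
    rw [ih _ (by simp only [pvSumCost] at *; omega)]

lemma pvACons (budget : Int) (b : String) (rest : List String) (hr : rest ≠ [])
    (hL : budget < PySem.Str.len (PySem.Str.join "\n" (b :: rest))) :
    pvKeepLoop (b :: rest).reverse budget [] 0 = pvKeepLoop rest.reverse budget [] 0 := by
  obtain ⟨c, t, hct⟩ := List.exists_cons_of_ne_nil (show rest.reverse ≠ [] by simpa using hr)
  have hKk : pvGCount budget (rest.reverse ++ [b]) 0 = pvGCount budget rest.reverse 0 := by
    rw [pvGApp]
    rw [if_neg (by
      rw [pvSumCost_reverse, pvSumCost_eq rest hr]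
      rw [pvLenJ_cons b rest hr] at hL
      omega)]
  rw [List.reverse_cons, hct]
  have hKk' : pvGCount budget (c :: (t ++ [b])) 0 = pvGCount budget (c :: t) 0 := by
    rw [hct] at hKk
    simpa using hKk
  rw [show (c :: t) ++ [b] = c :: (t ++ [b]) from rfl]
  rw [pvKeep_char, pvKeep_char, hKk']
  by_cases h0 : pvGCount budget (c :: t) 0 = 0
  · rw [if_pos h0, if_pos h0]
  · rw [if_neg h0, if_neg h0]
    have hle : pvGCount budget (c :: t) 0 ≤ (c :: t).length := pvGCount_le_length budget (c :: t) 0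
    rw [show (c :: (t ++ [b]) : List String) = (c :: t) ++ [b] from rfl]
    rw [List.take_append_of_le_length hle]

lemma pvAFull (budget : Int) (rest : List String) (hr : rest ≠ [])
    (h2 : PySem.Str.len (PySem.Str.join "\n" rest) ≤ budget) :
    pvKeepLoop rest.reverse budget [] 0 = rest := by
  obtain ⟨c, t, hct⟩ := List.exists_cons_of_ne_nil (show rest.reverse ≠ [] by simpa using hr)
  have hK : pvGCount budget (c :: t) 0 = (c :: t).length := by
    apply pvGFull
    rw [← hct, pvSumCost_reverse, pvSumCost_eq rest hr]
    omega
  rw [hct, pvKeep_char, if_neg (by simp [hK]), hK, List.take_length]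
  rw [← hct, List.reverse_reverse]

lemma pvShift (budget : Int) : ∀ (r : List String) (bodyLen removed : Int),
    pvDropLoop r bodyLen budget removed = (pvDropLoop r (bodyLen - removed) budget 0).map (· + removed) := by
  intro r
  induction r with
  | nil => intro bl rm; simp [pvDropLoop]
  | cons b t ih =>
    intro bl rm
    simp only [pvDropLoop]
    by_cases h : bl - rm > budget
    · rw [if_pos h, if_pos (by omega)]
      rw [ih bl (rm + PySem.Str.len b + 1), ih (bl - rm) (0 + PySem.Str.len b + 1)]
      simp only [Option.map_map]
      rw [show bl - (rm + PySem.Str.len b + 1) = bl - rm - (0 + PySem.Str.len b + 1) from by omega]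
      congr 1
      funext x
      simp only [Function.comp_apply]
      omega
    · rw [if_neg h, if_neg (by omega)]
      simp

lemma pvDrop_ge (budget : Int) : ∀ (r : List String) (bodyLen removed res : Int),
    pvDropLoop r bodyLen budget removed = some res → removed ≤ res := by
  intro r
  induction r with
  | nil => intro bl rm res h; simp [pvDropLoop] at h
  | cons b t ih =>
    intro bl rm res h
    have hlb := pvLenNonneg b
    simp only [pvDropLoop] at h
    split at h
    · have := ih bl (rm + PySem.Str.len b + 1) res h
      omega
    · simp at h
      omega

lemma pvSliceZero (s : String) : PySem.Str.slice s (some 0) none = s := by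
  apply String.toList_inj.mp
  simp [PySem.Str.toList_slice]

lemma pvSliceJoin (b : String) (rest : List String) (hr : rest ≠ []) (r : Int) (h : 0 ≤ r) :
    PySem.Str.slice (PySem.Str.join "\n" (b :: rest)) (some (r + (PySem.Str.len b + 1))) none =
      PySem.Str.slice (PySem.Str.join "\n" rest) (some r) none := by
  apply String.toList_inj.mp
  have hb := pvLenNonneg b
  simp only [PySem.Str.toList_slice, PySem.Chars.slice_eq_listSlice]
  rw [PySem.List.slice_from _ (by omega : (0:Int) ≤ r + (PySem.Str.len b + 1)),
      PySem.List.slice_from _ h]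
  rw [pvJoinToList_cons b rest hr]
  have hlen : b.toList.length = (PySem.Str.len b).toNat := by
    have := PySem.Str.len_eq b; omega
  rw [show (r + (PySem.Str.len b + 1)).toNat = b.toList.length + 1 + r.toNat from by omega]
  rw [← List.drop_drop, List.drop_length_add_append]
  simp

lemma pvGetNegOne_cons {α : Type} (b : α) (rest : List α) (hr : rest ≠ []) :
    PySem.List.pyGet? (b :: rest) (-1) = PySem.List.pyGet? rest (-1) := by
  have hl : 1 ≤ rest.length := List.length_pos_iff.mpr hr
  simp only [PySem.List.pyGet?, PySem.List.pyIdx?, List.length_cons]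
  rw [if_neg (by omega), if_pos (by omega), if_neg (by omega), if_pos (by omega)]
  simp only [Option.bind_some]
  have h1 : rest.length + 1 - (-(-1:Int)).toNat = rest.length := by omega
  have h2 : rest.length - (-(-1:Int)).toNat = rest.length - 1 := by omega
  rw [h1, h2]
  conv_lhs => rw [show rest.length = (rest.length - 1) + 1 from by omega]
  rw [List.getElem?_cons_succ]

lemma pvGetNegOne_single {α : Type} (b : α) : PySem.List.pyGet? [b] (-1) = some b := by
  simp [PySem.List.pyGet?, PySem.List.pyIdx?]

lemma pvMain (budget : Int) (hb : 0 ≤ budget) : ∀ (l : List String), l ≠ [] →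
    budget < PySem.Str.len (PySem.Str.join "\n" l) →
    (match pvDropLoop l (PySem.Str.len (PySem.Str.join "\n" l)) budget 0 with
     | none => PySem.Str.lstrip (PySem.Str.slice ((PySem.List.pyGet? l (-1)).getD "") (some (-budget)) none)
     | some removed => PySem.Str.slice (PySem.Str.join "\n" l) (some removed) none)
    = PySem.Str.join "\n" (pvKeepLoop l.reverse budget [] 0) := by
  intro l
  induction l with
  | nil => intro h; exact absurd rfl h
  | cons b rest ih =>
    intro _ hL
    by_cases hr : rest = []
    · subst hr
      rw [pvJoinSingleton] at hL
      simp only [pvJoinSingleton, List.reverse_cons, List.reverse_nil, List.nil_append]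
      have hnone : pvDropLoop [b] (PySem.Str.len b) budget 0 = none := by
        simp only [pvDropLoop]
        rw [if_pos (by omega)]
      rw [hnone, pvGetNegOne_single]
      rw [pvKeep_char, if_pos (by simp only [pvGCount]; rw [if_neg (by omega)])]
      rw [pvJoinSingleton]
      rfl
    · have hJl := pvLenJ_cons b rest hr
      have h1 : pvDropLoop (b :: rest) (PySem.Str.len (PySem.Str.join "\n" (b :: rest))) budget 0
          = pvDropLoop rest (PySem.Str.len (PySem.Str.join "\n" (b :: rest))) budget (0 + PySem.Str.len b + 1) := by
        simp only [pvDropLoop]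
        rw [if_pos (by have := pvLenNonneg (PySem.Str.join "\n" rest); omega)]
      rw [h1, pvShift]
      rw [show PySem.Str.len (PySem.Str.join "\n" (b :: rest)) - (0 + PySem.Str.len b + 1)
            = PySem.Str.len (PySem.Str.join "\n" rest) from by omega]
      rw [pvACons budget b rest hr hL]
      by_cases h2 : budget < PySem.Str.len (PySem.Str.join "\n" rest)
      · have hIH := ih hr h2
        rcases ho : pvDropLoop rest (PySem.Str.len (PySem.Str.join "\n" rest)) budget 0 with _ | r
        · rw [ho] at hIH
          show PySem.Str.lstrip (PySem.Str.slice ((PySem.List.pyGet? (b :: rest) (-1)).getD "") (some (-budget)) none)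
              = PySem.Str.join "\n" (pvKeepLoop rest.reverse budget [] 0)
          rw [pvGetNegOne_cons b rest hr]
          exact hIH
        · rw [ho] at hIH
          show PySem.Str.slice (PySem.Str.join "\n" (b :: rest)) (some (r + (0 + PySem.Str.len b + 1))) none
              = PySem.Str.join "\n" (pvKeepLoop rest.reverse budget [] 0)
          have hr0 : (0:Int) ≤ r := pvDrop_ge budget rest _ 0 r ho
          rw [show r + (0 + PySem.Str.len b + 1) = r + (PySem.Str.len b + 1) from by omega]
          rw [pvSliceJoin b rest hr r hr0]
          exact hIH
      · rw [Int.not_lt] at h2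
        have hsome : pvDropLoop rest (PySem.Str.len (PySem.Str.join "\n" rest)) budget 0 = some 0 := by
          obtain ⟨c, t, rfl⟩ := List.exists_cons_of_ne_nil hr
          simp only [pvDropLoop]
          rw [if_neg (by omega)]
        rw [hsome]
        show PySem.Str.slice (PySem.Str.join "\n" (b :: rest)) (some (0 + (0 + PySem.Str.len b + 1))) none
            = PySem.Str.join "\n" (pvKeepLoop rest.reverse budget [] 0)
        rw [show (0:Int) + (0 + PySem.Str.len b + 1) = 0 + (PySem.Str.len b + 1) from by omega]
        rw [pvSliceJoin b rest hr 0 le_rfl, pvSliceZero]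
        rw [pvAFull budget rest hr h2]

-- ===== VERDICT (by name: the statement is the Claim_ definition above) =====
theorem format_conversation_section_py_spec : Claim_equal_format_conversation_section_py := by
  intro conv_blocks max_chars _
  unfold Spec_format_conversation_section_py
  rcases conv_blocks with _ | ⟨b, rest⟩
  · unfold format_conversation_section_py format_conversation_section_py_alt
    simp
  · simp only [format_conversation_section_py, format_conversation_section_py_alt,
      List.isEmpty_cons, Bool.false_eq_true, if_false]
    by_cases h1 : PySem.Str.len (pvConvHeader ++ PySem.Str.join "\n" (b :: rest)) ≤ max_chars
    · rw [if_pos h1, if_pos h1]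
    · rw [if_neg h1, if_neg h1]
      by_cases h2 : max_chars - PySem.Str.len pvConvHeader - PySem.Str.len pvConvTruncLead < 40
      · rw [if_pos h2, if_pos h2]
      · rw [if_neg h2, if_neg h2]
        have hb : (0:Int) ≤ max_chars - PySem.Str.len pvConvHeader - PySem.Str.len pvConvTruncLead := by omega
        have hbody : max_chars - PySem.Str.len pvConvHeader - PySem.Str.len pvConvTruncLead
            < PySem.Str.len (PySem.Str.join "\n" (b :: rest)) := by
          rw [PySem.Str.len_append] at h1
          have := pvLenNonneg pvConvTruncLead
          omega
        have hmain := pvMain _ hb (b :: rest) (by simp) hbody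
        rcases ho : pvDropLoop (b :: rest) (PySem.Str.len (PySem.Str.join "\n" (b :: rest)))
            (max_chars - PySem.Str.len pvConvHeader - PySem.Str.len pvConvTruncLead) 0 with _ | r
        · rw [← hmain, ho]
        · rw [← hmain, ho]
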